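-- pv_equiv track=rewrite | github.com/Nikolas-Cao/novel_writer_agent_from_scratch | graph/nodes/update_outline.py | _chapter_pos
-- ===== SOURCE A (Python) =====
-- from typing import Any, Dict, List, Optional, Set, Tuple
--
-- def _chapter_pos(outline_structure: Dict[str, Any], chapter_index: int) -> Optional[Tuple[int, int]]:
--     idx = 0
--     for v_i, volume in enumerate(outline_structure.get("volumes", [])):
--         for c_i, _ in enumerate(volume.get("chapters", [])):
--             if idx == chapter_index:
--                 return v_i, c_i
--             idx += 1
--     return None
-- ===== SOURCE B (Python) =====
-- from typing import Any, Dict, Optional, Tuple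
--
-- def _chapter_pos(outline_structure: Dict[str, Any], chapter_index: int) -> Optional[Tuple[int, int]]:
--     rem = chapter_index
--     for v_i, volume in enumerate(outline_structure.get("volumes", [])):
--         n = len(volume.get("chapters", []))
--         if 0 <= rem < n:
--             return v_i, rem
--         rem -= n
--     return None
-- ===== Notes on version B (the rewrite author's own statement) =====
-- stated objective: alternative
-- what changed: Instead of enumerating every chapter of every volume with a running counter, B iterates volumes only and subtracts each volume's chapter count from the target index, returning as soon as the remainder falls inside the current volume; it trades the per-chapter counter for per-volume length arithmetic.
import Mathlib
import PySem

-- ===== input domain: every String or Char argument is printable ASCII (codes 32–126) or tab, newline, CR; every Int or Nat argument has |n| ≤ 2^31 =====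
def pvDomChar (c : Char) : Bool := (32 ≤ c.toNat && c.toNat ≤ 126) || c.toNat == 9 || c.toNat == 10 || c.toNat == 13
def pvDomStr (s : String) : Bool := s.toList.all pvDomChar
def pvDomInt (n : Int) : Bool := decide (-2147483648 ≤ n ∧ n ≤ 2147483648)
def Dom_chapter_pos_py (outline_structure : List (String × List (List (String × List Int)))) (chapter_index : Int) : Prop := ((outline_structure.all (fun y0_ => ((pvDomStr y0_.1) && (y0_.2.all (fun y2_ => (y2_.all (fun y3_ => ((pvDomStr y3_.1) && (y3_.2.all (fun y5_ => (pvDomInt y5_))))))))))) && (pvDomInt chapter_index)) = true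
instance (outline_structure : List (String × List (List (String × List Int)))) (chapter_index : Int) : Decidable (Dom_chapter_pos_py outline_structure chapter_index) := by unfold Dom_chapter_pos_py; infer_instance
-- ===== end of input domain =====

-- B changes the algorithm: it skips over whole volumes by subtracting chapter counts,
-- instead of A's chapter-by-chapter counter. Return values agree everywhere.

-- ===== PORT A =====
-- d.get(k, dflt) on an association list (dict convention): first match, else default.
def pvGetD {V : Type} (l : List (String × V)) (k : String) (dflt : V) : V :=
  PySem.Dict.getD (PySem.Dict.mk l) k dflt

-- inner loop of A: 'for c_i, _ in enumerate(chapters): if idx == chapter_index: return v_i, c_i; idx += 1'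
-- returns (early-return value if any, updated idx)
def chapterPosInnerA (chapter_index v_i c_i idx : Int)
    (chs : List Int) : Option (Int × Int) × Int :=
  match chs with
  | [] => (none, idx)
  | _ :: t =>
    if idx = chapter_index then (some (v_i, c_i), idx)
    else chapterPosInnerA chapter_index v_i (c_i + 1) (idx + 1) t

-- outer loop of A over enumerate(volumes)
def chapterPosOuterA (chapter_index v_i idx : Int)
    (vols : List (List (String × List Int))) : Option (Int × Int) :=
  match vols with
  | [] => none
  | v :: t =>
    match chapterPosInnerA chapter_index v_i 0 idx (pvGetD v "chapters" []) with
    | (some r, _) => some r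
    | (none, idx') => chapterPosOuterA chapter_index (v_i + 1) idx' t

def chapter_pos_py (outline_structure : List (String × List (List (String × List Int)))) (chapter_index : Int) : Option (Int × Int) :=
  chapterPosOuterA chapter_index 0 0 (pvGetD outline_structure "volumes" [])

-- ===== PORT B =====
-- B's loop: keep the remaining index; skip whole volumes by their chapter count.
def chapterPosOuterB (rem v_i : Int)
    (vols : List (List (String × List Int))) : Option (Int × Int) :=
  match vols with
  | [] => none
  | v :: t =>
    let n : Int := (pvGetD v "chapters" []).length
    if 0 ≤ rem ∧ rem < n then some (v_i, rem)
    else chapterPosOuterB (rem - n) (v_i + 1) t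

def chapter_pos_py_alt (outline_structure : List (String × List (List (String × List Int)))) (chapter_index : Int) : Option (Int × Int) :=
  chapterPosOuterB chapter_index 0 (pvGetD outline_structure "volumes" [])

-- ===== PRECONDITION & SPEC =====
def Spec_chapter_pos_py (outline_structure : List (String × List (List (String × List Int)))) (chapter_index : Int) (out : Option (Int × Int)) : Prop := out = chapter_pos_py_alt outline_structure chapter_index
instance (outline_structure : List (String × List (List (String × List Int)))) (chapter_index : Int) (out : Option (Int × Int)) : Decidable (Spec_chapter_pos_py outline_structure chapter_index out) := by unfold Spec_chapter_pos_py; infer_instance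

-- ===== CLAIM (what is proved, stated in full; the proofs are below) =====
def Claim_equal_chapter_pos_py : Prop := ∀ (outline_structure : List (String × List (List (String × List Int)))) (chapter_index : Int), Dom_chapter_pos_py outline_structure chapter_index → Spec_chapter_pos_py outline_structure chapter_index (chapter_pos_py outline_structure chapter_index)

-- ===== LEMMAS AND PROOFS =====

-- characterisation of A's inner chapter loop
lemma chapterPosInnerA_eq (chs : List Int) : ∀ (ci v_i c_i idx : Int),
    chapterPosInnerA ci v_i c_i idx chs =
      if idx ≤ ci ∧ ci < idx + chs.length then (some (v_i, c_i + (ci - idx)), ci)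
      else (none, idx + chs.length) := by
  induction chs with
  | nil =>
    intro ci v_i c_i idx
    simp [chapterPosInnerA]
  | cons h t ih =>
    intro ci v_i c_i idx
    simp only [chapterPosInnerA]
    by_cases hidx : idx = ci
    · subst hidx
      rw [if_pos rfl, if_pos (by simp only [List.length_cons]; push_cast; omega)]
      simp
    · rw [if_neg hidx, ih]
      by_cases hc : idx + 1 ≤ ci ∧ ci < idx + 1 + (t.length : Int)
      · rw [if_pos hc, if_pos (by simp only [List.length_cons]; push_cast; omega)]
        have : c_i + 1 + (ci - (idx + 1)) = c_i + (ci - idx) := by omega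
        rw [this]
      · rw [if_neg hc, if_neg (by simp only [List.length_cons]; push_cast; omega)]
        simp only [List.length_cons]
        push_cast
        rw [add_assoc, add_comm (1:Int)]

-- A's outer loop equals B's loop with rem = chapter_index - idx
lemma outerA_eq_outerB (vols : List (List (String × List Int))) :
    ∀ (ci v_i idx : Int),
    chapterPosOuterA ci v_i idx vols = chapterPosOuterB (ci - idx) v_i vols := by
  induction vols with
  | nil => intro ci v_i idx; rfl
  | cons v t ih =>
    intro ci v_i idx
    simp only [chapterPosOuterA, chapterPosOuterB, chapterPosInnerA_eq]
    by_cases hc : idx ≤ ci ∧ ci < idx + ((pvGetD v "chapters" []).length : Int)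
    · rw [if_pos hc, if_pos (by omega)]
      show some (v_i, 0 + (ci - idx)) = some (v_i, ci - idx)
      norm_num
    · rw [if_neg hc, if_neg (by omega)]
      show chapterPosOuterA ci (v_i + 1) (idx + ((pvGetD v "chapters" []).length : Int)) t = _
      rw [ih]
      congr 1
      omega

-- ===== VERDICT (by name: the statement is the Claim_ definition above) =====
theorem chapter_pos_py_spec : Claim_equal_chapter_pos_py := by
  intro os ci _
  show chapter_pos_py os ci = chapter_pos_py_alt os ci
  unfold chapter_pos_py chapter_pos_py_alt
  rw [outerA_eq_outerB]
  norm_num
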